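-- pv_equiv track=rewrite | github.com/alexandraback/datacollection | solutions_2463486_1/Python/pawko/C.py | gen_palins
-- ===== SOURCE A (Python) =====
-- def gen_half_digits_recur(digits, results, idx, points):
--     if idx < 0:
--         results.append(tuple(digits))
--         return
--     if idx+1 == len(digits):
--         start=1
--     else:
--         start=0
--     for d in range(start, 10):
--         if 2*d*d <= points:
--             digits[idx] = d
--             gen_half_digits_recur(digits, results, idx-1, points - 2*d*d)
--
-- def gen_half_digits(max_digits):
--     digits = [0]*max_digits
--     results = []
--     gen_half_digits_recur(digits, results, max_digits-1, 9)
--     return results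
--
-- def make_full_palin_num(half_digits):
--     result = 0
--     mul = 1
--     for d in reversed(half_digits):
--         result += d * mul
--         mul *= 10
--     for d in half_digits:
--         result += d * mul
--         mul *= 10
--     return result
--
-- def gen_full_odd_palin_nums(half_digits):
--     results = []
--     points = 9 - 2 * sum(d*d for d in half_digits)
--     for odd in range(10):
--         if odd*odd > points:
--             continue
--         result = 0
--         mul = 1
--         for d in reversed(half_digits):
--             result += d * mul
--             mul *= 10
--         result += odd * mul
--         mul *= 10
--         for d in half_digits:
--             result += d * mul
--             mul *= 10
--         if result > 0:
--             results.append(result)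
--     return results
--
-- def gen_palins(max_half_digits):
--     results = []
--     for hd_cnt in range(max_half_digits + 1):
--         hd_results = gen_half_digits(hd_cnt)
--         palins = [make_full_palin_num(hd) for hd in hd_results]
--         results.extend(p for p in palins if p > 0)
--         palins_tabs = [gen_full_odd_palin_nums(hd) for hd in hd_results]
--         for pt in palins_tabs:
--             results.extend(pt)
--     return results
-- ===== SOURCE B (Python) =====
-- def _ones(m, k):
--     # binary strings of length m with at most k ones, lexicographically ascending,
--     # enumerated by the position of the first one (later first-one = smaller string)
--     res = [(0,) * m]
--     if k == 0 or m == 0: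
--         return res
--     for p in range(m - 1, -1, -1):
--         pre = (0,) * p + (1,)
--         for t in _ones(m - p - 1, k - 1):
--             res.append(pre + t)
--     return res
--
-- def gen_palins(max_half_digits):
--     # a half must have a bounded digit-square sum and a nonzero leading digit, so it
--     # is a leading one plus a binary tail with at most three ones, or a leading two
--     # plus zeros
--     out = []
--     for n in range(max_half_digits + 1):
--         if n == 0:
--             halves = [()]
--         else:
--             halves = [(1,) + t for t in _ones(n - 1, 3)] + [(2,) + (0,) * (n - 1)]
--         for hd in halves:
--             if hd:
--                 left = 0
--                 for d in hd:
--                     left = left * 10 + d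
--                 right = 0
--                 for d in reversed(hd):
--                     right = right * 10 + d
--                 out.append(left * 10 ** n + right)
--         for hd in halves:
--             s = sum(d * d for d in hd)
--             left = 0
--             for d in hd:
--                 left = left * 10 + d
--             right = 0
--             for d in reversed(hd):
--                 right = right * 10 + d
--             for m in range(10):
--                 if m * m <= 9 - 2 * s:
--                     v = (left * 10 + m) * 10 ** n + right
--                     if v > 0:
--                         out.append(v)
--     return out
-- ===== Notes on version B (the rewrite author's own statement) =====
-- stated objective: alternative
-- what changed: Replaces the generic pruned digit-by-digit DFS over all ten digits with a direct combinatorial enumeration of the halves (a leading one followed by a binary tail with at most three ones, generated by the position of each next one, or a leading two followed by zeros) and assembles each palindrome with Horner folds and a closed-form power-of-ten shift instead of a threaded multiplier accumulator.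
import Mathlib
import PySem

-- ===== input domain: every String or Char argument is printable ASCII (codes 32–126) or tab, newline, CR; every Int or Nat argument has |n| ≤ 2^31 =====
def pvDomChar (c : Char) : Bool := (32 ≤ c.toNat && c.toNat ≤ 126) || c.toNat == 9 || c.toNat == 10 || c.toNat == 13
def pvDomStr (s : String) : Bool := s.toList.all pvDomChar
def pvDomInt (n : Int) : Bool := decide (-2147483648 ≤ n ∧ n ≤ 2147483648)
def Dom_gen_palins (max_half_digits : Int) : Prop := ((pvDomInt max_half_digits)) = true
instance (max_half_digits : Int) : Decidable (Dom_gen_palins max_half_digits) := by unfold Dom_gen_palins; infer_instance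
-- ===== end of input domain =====

-- B replaces A's generic pruned digit-DFS by a direct combinatorial enumeration of the halves
-- (a leading one plus a binary tail with at most three ones generated by one-positions, or a
-- leading two plus zeros) and builds each palindrome with Horner folds and a closed-form
-- power-of-ten shift; same cost, different algorithm.

-- ===== PORT A =====

-- `sum(d*d for d in hd)` (this generator expression appears verbatim in both Pythons)
def pvSumSq (hd : List Int) : Int := hd.foldl (fun s d => s + d * d) 0

mutual
-- gen_half_digits_recur: `digits` and `results` are mutated in Python, so they are threaded
-- through and returned.  The Int index idx is carried as the Nat fuel n = idx+1 (idx < 0 ⟺ n = 0);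
-- `digits[idx] = d` is digits.set n d, exact because idx = n is ≥ 0 and < len(digits) whenever
-- Python executes the assignment.
def pvGhdRecur : Nat → List Int → List (List Int) → Int → List Int × List (List Int)
  | 0, digits, results, _points => (digits, results ++ [digits])
  | n + 1, digits, results, points =>
      let start : Int := if ((n : Int) + 1) = (digits.length : Int) then 1 else 0
      pvGhdLoop n digits results points (PySem.List.pyRange start 10 1)
  termination_by n _ _ _ => (2 * n + 1, 0)

-- the `for d in range(start, 10)` loop of gen_half_digits_recur
def pvGhdLoop : Nat → List Int → List (List Int) → Int → List Int → List Int × List (List Int)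
  | _n, digits, results, _points, [] => (digits, results)
  | n, digits, results, points, d :: ds =>
      if 2 * d * d ≤ points then
        let st := pvGhdRecur n (digits.set n d) results (points - 2 * d * d)
        pvGhdLoop n st.1 st.2 points ds
      else pvGhdLoop n digits results points ds
  termination_by n _ _ _ ds => (2 * n + 2, ds.length)
end

def gen_half_digits (max_digits : Int) : List (List Int) :=
  (pvGhdRecur max_digits.toNat (List.replicate max_digits.toNat (0 : Int)) [] 9).2

def pvPalinStep (p : Int × Int) (d : Int) : Int × Int := (p.1 + d * p.2, p.2 * 10)

def make_full_palin_num (half_digits : List Int) : Int :=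
  let p := half_digits.reverse.foldl pvPalinStep ((0 : Int), (1 : Int))
  (half_digits.foldl pvPalinStep p).1

def gen_full_odd_palin_nums (half_digits : List Int) : List Int :=
  let points : Int := 9 - 2 * pvSumSq half_digits
  (PySem.List.pyRange 0 10 1).foldl (fun results odd =>
    if odd * odd > points then results
    else
      let p := half_digits.reverse.foldl pvPalinStep ((0 : Int), (1 : Int))
      let q := (p.1 + odd * p.2, p.2 * 10)
      let result := (half_digits.foldl pvPalinStep q).1
      if result > 0 then results ++ [result] else results) []

def gen_palins (max_half_digits : Int) : List Int :=
  (PySem.List.pyRange 0 (max_half_digits + 1) 1).foldl (fun results hd_cnt =>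
    let hd_results := gen_half_digits hd_cnt
    let palins := hd_results.map make_full_palin_num
    let results1 := results ++ palins.filter (fun p => decide (p > 0))
    let palins_tabs := hd_results.map gen_full_odd_palin_nums
    palins_tabs.foldl (fun r pt => r ++ pt) results1) []

-- ===== PORT B =====

mutual
-- _ones(m, k): `res` is threaded; the inner `for t in _ones(...): res.append(pre + t)` loop is the map ++
def pvOnes : Nat → Nat → List (List Int)
  | m, 0 => [List.replicate m (0 : Int)]
  | m, k + 1 =>
      if m = 0 then [List.replicate m (0 : Int)]
      else pvOnesLoop m k [List.replicate m (0 : Int)]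
             (PySem.List.pyRange ((m : Int) - 1) (-1) (-1))
  termination_by _ k => (k, 0)

-- the `for p in range(m-1, -1, -1)` loop of _ones (every p it visits is ≥ 0, so p.toNat is exact)
def pvOnesLoop : Nat → Nat → List (List Int) → List Int → List (List Int)
  | _m, _k, res, [] => res
  | m, k, res, p :: ps =>
      let pre := List.replicate p.toNat (0 : Int) ++ [(1 : Int)]
      pvOnesLoop m k (res ++ (pvOnes (m - p.toNat - 1) k).map (fun t => pre ++ t)) ps
  termination_by _ k _ ps => (k, ps.length + 1)
end

def pvHorner (hd : List Int) : Int := hd.foldl (fun a d => a * 10 + d) 0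

def pvHalves (n : Int) : List (List Int) :=
  if n = 0 then [([] : List Int)]
  else (pvOnes (n - 1).toNat 3).map (fun t => (1 : Int) :: t) ++
       [(2 : Int) :: List.replicate (n - 1).toNat (0 : Int)]

-- `10 ** n` is 10 ^ n.toNat (n ≥ 0 on every loop iteration)
def gen_palins_alt (max_half_digits : Int) : List Int :=
  (PySem.List.pyRange 0 (max_half_digits + 1) 1).foldl (fun out n =>
    let halves := pvHalves n
    let out1 := halves.foldl (fun acc hd =>
      if hd ≠ [] then acc ++ [pvHorner hd * 10 ^ n.toNat + pvHorner hd.reverse] else acc) out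
    halves.foldl (fun acc hd =>
      let s := pvSumSq hd
      (PySem.List.pyRange 0 10 1).foldl (fun acc2 m =>
        if m * m ≤ 9 - 2 * s then
          let v := (pvHorner hd * 10 + m) * 10 ^ n.toNat + pvHorner hd.reverse
          if v > 0 then acc2 ++ [v] else acc2
        else acc2) acc) out1) []

-- ===== PRECONDITION & SPEC =====
def Spec_gen_palins (max_half_digits : Int) (out : List Int) : Prop := out = gen_palins_alt max_half_digits
instance (max_half_digits : Int) (out : List Int) : Decidable (Spec_gen_palins max_half_digits out) := by unfold Spec_gen_palins; infer_instance

-- ===== CLAIM (what is proved, stated in full; the proofs are below) =====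
def Claim_equal_gen_palins : Prop := ∀ (max_half_digits : Int), Dom_gen_palins max_half_digits → Spec_gen_palins max_half_digits (gen_palins max_half_digits)

-- ===== LEMMAS AND PROOFS =====

def pvTails : Nat → Nat → Int → List (List Int)
  | 0, _, _ => [[]]
  | n + 1, L, points =>
      ((PySem.List.pyRange (if ((n : Int) + 1) = (L : Int) then 1 else 0) 10 1).filter
          (fun d => decide (2 * d * d ≤ points))).flatMap
        (fun d => (pvTails n L (points - 2 * d * d)).map (fun t => d :: t))
def pvTailsI : Nat → Int → List (List Int)
  | 0, _ => [[]]
  | n + 1, points =>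
      ((PySem.List.pyRange 0 10 1).filter (fun d => decide (2 * d * d ≤ points))).flatMap
        (fun d => (pvTailsI n (points - 2 * d * d)).map (fun t => d :: t))

lemma horner_acc (l : List Int) : ∀ (a : Int),
    l.foldl (fun a d => a * 10 + d) a = a * 10 ^ l.length + pvHorner l := by
  unfold pvHorner
  induction l with
  | nil => intro a; simp
  | cons d l ih =>
    intro a
    simp only [List.foldl_cons, List.length_cons]
    rw [ih (a * 10 + d), ih (0 * 10 + d)]
    ring

lemma horner_nonneg (l : List Int) (h : ∀ d ∈ l, 0 ≤ d) : 0 ≤ pvHorner l := by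
  induction l with
  | nil => simp [pvHorner]
  | cons d l ih =>
    have h1 : (0:Int) ≤ d := h d (by simp)
    have h2 := ih (fun x hx => h x (by simp [hx]))
    have : pvHorner (d :: l) = d * 10 ^ l.length + pvHorner l := by
      simp only [pvHorner, List.foldl_cons]
      simpa using horner_acc l d
    rw [this]
    positivity

lemma horner_append_singleton (xs : List Int) (d : Int) :
    pvHorner (xs ++ [d]) = pvHorner xs * 10 + d := by
  simp [pvHorner, List.foldl_append]

lemma palinStep_foldl (l : List Int) : ∀ (r m : Int),
    l.foldl pvPalinStep (r, m) = (r + m * pvHorner l.reverse, m * 10 ^ l.length) := by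
  induction l with
  | nil => intro r m; simp [pvHorner]
  | cons d l ih =>
    intro r m
    simp only [List.foldl_cons, pvPalinStep, List.reverse_cons, List.length_cons]
    rw [ih, horner_append_singleton]
    apply Prod.ext <;> simp <;> ring

lemma makeFull_eq (hd : List Int) :
    make_full_palin_num hd = pvHorner hd + 10 ^ hd.length * pvHorner hd.reverse := by
  show (hd.foldl pvPalinStep (hd.reverse.foldl pvPalinStep ((0 : Int), (1 : Int)))).1 = _
  have h1 : hd.reverse.foldl pvPalinStep ((0 : Int), (1 : Int)) = (pvHorner hd, 10 ^ hd.length) := by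
    rw [palinStep_foldl, List.reverse_reverse, List.length_reverse]
    simp
  rw [h1, palinStep_foldl]

lemma sumSq_reverse (l : List Int) : pvSumSq l.reverse = pvSumSq l := by
  have h : ∀ (xs : List Int) (a : Int), xs.foldl (fun s d => s + d * d) a = a + ((xs.map (fun d => d * d)).sum) := by
    intro xs
    induction xs with
    | nil => intro a; simp
    | cons d xs ih => intro a; simp [ih]; ring
  unfold pvSumSq
  rw [h, h, List.map_reverse, List.sum_reverse]

lemma tailsI_one (n : Nat) : pvTailsI n 1 = [List.replicate n (0 : Int)] := by
  induction n with
  | zero => rfl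
  | succ n ih =>
    rw [show pvTailsI (n+1) 1 = ((PySem.List.pyRange 0 10 1).filter (fun d => decide (2 * d * d ≤ 1))).flatMap
        (fun d => (pvTailsI n (1 - 2 * d * d)).map (fun t => d :: t)) from rfl]
    rw [show (PySem.List.pyRange 0 10 1).filter (fun d => decide (2 * d * d ≤ 1)) = [0] by decide]
    simp [ih, List.replicate_succ]

lemma tails_interior (n : Nat) : ∀ (L : Nat) (points : Int), n < L →
    pvTails n L points = pvTailsI n points := by
  induction n with
  | zero => intro L p _; rfl
  | succ n ih =>
    intro L p h
    rw [show pvTails (n+1) L p = ((PySem.List.pyRange (if ((n : Int) + 1) = (L : Int) then 1 else 0) 10 1).filter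
          (fun d => decide (2 * d * d ≤ p))).flatMap
        (fun d => (pvTails n L (p - 2 * d * d)).map (fun t => d :: t)) from rfl]
    have hne : ¬ (((n : Int) + 1) = (L : Int)) := by
      intro he
      omega
    rw [if_neg hne]
    rw [show pvTailsI (n+1) p = ((PySem.List.pyRange 0 10 1).filter (fun d => decide (2 * d * d ≤ p))).flatMap
        (fun d => (pvTailsI n (p - 2 * d * d)).map (fun t => d :: t)) from rfl]
    have hii : ∀ q, pvTails n L q = pvTailsI n q := fun q => ih L q (by omega)
    simp only [hii]

lemma tails_top (k : Nat) :
    pvTails (k + 1) (k + 1) 9 =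
      (pvTailsI k 7).map (fun t => (1 : Int) :: t) ++ (pvTailsI k 1).map (fun t => (2 : Int) :: t) := by
  rw [show pvTails (k+1) (k+1) 9 = ((PySem.List.pyRange (if ((k : Int) + 1) = ((k+1 : Nat) : Int) then 1 else 0) 10 1).filter
          (fun d => decide (2 * d * d ≤ 9))).flatMap
        (fun d => (pvTails k (k+1) (9 - 2 * d * d)).map (fun t => d :: t)) from rfl]
  rw [if_pos (by push_cast; ring)]
  rw [show (PySem.List.pyRange 1 10 1).filter (fun d => decide (2 * d * d ≤ 9)) = [1, 2] by decide]
  simp only [List.flatMap_cons, List.flatMap_nil, List.append_nil]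
  rw [tails_interior k (k+1) _ (Nat.lt_succ_self k), tails_interior k (k+1) _ (Nat.lt_succ_self k)]
  norm_num

lemma pvOnes_zero_m (k : Nat) : pvOnes 0 k = [[]] := by
  cases k <;> simp [pvOnes]

lemma pvOnesLoop_char (m k : Nat) : ∀ (ps : List Int) (res : List (List Int)),
    pvOnesLoop m k res ps =
      res ++ ps.flatMap (fun p =>
        (pvOnes (m - p.toNat - 1) k).map (fun t => (List.replicate p.toNat (0 : Int) ++ [1]) ++ t)) := by
  intro ps
  induction ps with
  | nil => intro res; simp [pvOnesLoop]
  | cons p ps ih => intro res; rw [pvOnesLoop, ih]; simp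

lemma descRange (m : Nat) :
    PySem.List.pyRange ((m : Int) - 1) (-1) (-1) = (List.range m).reverse.map (fun (i : Nat) => (i : Int)) := by
  induction m with
  | zero => decide
  | succ m ih =>
    rw [PySem.List.pyRange_neg_one_cons (by push_cast; omega)]
    rw [show ((m+1 : Nat) : Int) - 1 - 1 = (m : Int) - 1 by push_cast; ring]
    rw [ih, List.range_succ]
    simp

lemma loop_over_desc (m k : Nat) (res : List (List Int)) :
    pvOnesLoop m k res (PySem.List.pyRange ((m : Int) - 1) (-1) (-1)) =
      res ++ (List.range m).reverse.flatMap (fun p : Nat =>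
        (pvOnes (m - p - 1) k).map (fun t => (List.replicate p (0 : Int) ++ [1]) ++ t)) := by
  rw [show ((m : Int) - 1) = (((m : Nat) : Int) - 1) from rfl, descRange, pvOnesLoop_char,
    List.flatMap_map]
  simp only [Int.toNat_natCast]

lemma ones_unfold (m k : Nat) :
    pvOnes (m + 1) (k + 1) =
      (pvOnes m (k + 1)).map (fun t => (0 : Int) :: t) ++ (pvOnes m k).map (fun t => (1 : Int) :: t) := by
  have hsub : ∀ p : Nat, m + 1 - p - 1 = m - p := fun p => by omega
  have hsplit : (List.range (m+1)).reverse = (List.range m).reverse.map (· + 1) ++ [0] := by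
    rw [List.range_succ_eq_map]
    simp
  rw [show pvOnes (m + 1) (k + 1) = pvOnesLoop (m+1) k [List.replicate (m+1) (0:Int)]
        (PySem.List.pyRange (((m+1 : Nat) : Int) - 1) (-1) (-1)) by rw [pvOnes]; simp]
  rw [show (((m+1 : Nat) : Int) - 1) = ((m+1 : Nat) : Int) - 1 from rfl, loop_over_desc]
  simp only [hsub]
  rw [hsplit, List.flatMap_append, List.flatMap_map]
  by_cases hm : m = 0
  · subst hm
    simp [pvOnes_zero_m]
  · rw [show pvOnes m (k + 1) = pvOnesLoop m k [List.replicate m (0:Int)]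
        (PySem.List.pyRange (((m : Nat) : Int) - 1) (-1) (-1)) by rw [pvOnes]; simp [hm]]
    rw [loop_over_desc]
    simp only [List.map_append, List.map_map, List.map_flatMap]
    simp [Nat.sub_add_eq, List.replicate_succ, Function.comp_def, List.append_assoc]

lemma tailsI_eq_ones (m : Nat) : ∀ (j : Nat), j ≤ 3 → pvTailsI m (2 * (j : Int) + 1) = pvOnes m j := by
  induction m with
  | zero => intro j _; rw [pvOnes_zero_m]; rfl
  | succ m ih =>
    intro j hj
    cases j with
    | zero =>
      rw [show pvTailsI (m+1) (2 * ((0:Nat) : Int) + 1) =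
          ((PySem.List.pyRange 0 10 1).filter (fun d => decide (2 * d * d ≤ 2 * ((0:Nat) : Int) + 1))).flatMap
            (fun d => (pvTailsI m (2 * ((0:Nat) : Int) + 1 - 2 * d * d)).map (fun t => d :: t)) from rfl]
      rw [show (PySem.List.pyRange 0 10 1).filter (fun d => decide (2 * d * d ≤ 2 * ((0:Nat) : Int) + 1)) = [0] by decide]
      simp only [List.flatMap_cons, List.flatMap_nil, List.append_nil]
      rw [show (2 * ((0:Nat) : Int) + 1 - 2 * 0 * 0) = 2 * ((0:Nat) : Int) + 1 by ring]
      rw [ih 0 (by omega)]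
      simp [pvOnes, List.replicate_succ]
    | succ j' =>
      rw [show pvTailsI (m+1) (2 * ((j'+1:Nat) : Int) + 1) =
          ((PySem.List.pyRange 0 10 1).filter (fun d => decide (2 * d * d ≤ 2 * ((j'+1:Nat) : Int) + 1))).flatMap
            (fun d => (pvTailsI m (2 * ((j'+1:Nat) : Int) + 1 - 2 * d * d)).map (fun t => d :: t)) from rfl]
      have hfilter : (PySem.List.pyRange 0 10 1).filter (fun d => decide (2 * d * d ≤ 2 * ((j'+1:Nat) : Int) + 1)) = [0, 1] := by
        have hj2 : j' ≤ 2 := by omega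
        interval_cases j' <;> decide
      rw [hfilter]
      simp only [List.flatMap_cons, List.flatMap_nil, List.append_nil]
      rw [show (2 * ((j'+1:Nat) : Int) + 1 - 2 * 0 * 0) = 2 * ((j'+1:Nat) : Int) + 1 by ring]
      rw [show (2 * ((j'+1:Nat) : Int) + 1 - 2 * 1 * 1) = 2 * ((j':Nat) : Int) + 1 by push_cast; ring]
      rw [ih (j'+1) hj, ih j' (by omega), ones_unfold]

lemma ones_mem (m : Nat) : ∀ (k : Nat) (t : List Int), t ∈ pvOnes m k →
    t.length = m ∧ ∀ d ∈ t, d = 0 ∨ d = 1 := by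
  induction m with
  | zero => intro k t ht; rw [pvOnes_zero_m] at ht; simp at ht; simp [ht]
  | succ m ih =>
    intro k t ht
    match k with
    | 0 =>
      simp [pvOnes] at ht
      subst ht
      refine ⟨by simp, ?_⟩
      intro d hd
      exact Or.inl (List.eq_of_mem_replicate hd)
    | k + 1 =>
      rw [ones_unfold] at ht
      rcases List.mem_append.mp ht with h | h <;>
        rcases List.mem_map.mp h with ⟨t', ht', rfl⟩
      · obtain ⟨hl, hd⟩ := ih (k+1) t' ht'
        refine ⟨by simp [hl], ?_⟩
        intro d hd'
        rcases List.mem_cons.mp hd' with rfl | h' <;> [exact Or.inl rfl; exact hd d h']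
      · obtain ⟨hl, hd⟩ := ih k t' ht'
        refine ⟨by simp [hl], ?_⟩
        intro d hd'
        rcases List.mem_cons.mp hd' with rfl | h' <;> [exact Or.inr rfl; exact hd d h']

lemma drop_set_cons (l : List Int) : ∀ (n : Nat) (d : Int), n < l.length →
    (l.set n d).drop n = d :: l.drop (n + 1) := by
  induction l with
  | nil => intro n d h; simp at h
  | cons x l ih =>
    intro n d h
    cases n with
    | zero => simp
    | succ n => simpa using ih n d (by simpa using h)

lemma pvGhd_char (n : Nat) : ∀ (digits : List Int) (results : List (List Int)) (points : Int),
    n ≤ digits.length →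
    (pvGhdRecur n digits results points).1.length = digits.length ∧
    (pvGhdRecur n digits results points).1.drop n = digits.drop n ∧
    (pvGhdRecur n digits results points).2 =
      results ++ (pvTails n digits.length points).map (fun c => c.reverse ++ digits.drop n) := by
  induction n with
  | zero =>
    intro digits results points _
    simp [pvGhdRecur, pvTails]
  | succ n ih =>
    intro digits results points h
    have hloop : ∀ (ds : List Int) (dg : List Int) (res : List (List Int)),
        dg.length = digits.length → dg.drop (n+1) = digits.drop (n+1) →
        (pvGhdLoop n dg res points ds).1.length = digits.length ∧
        (pvGhdLoop n dg res points ds).1.drop (n+1) = digits.drop (n+1) ∧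
        (pvGhdLoop n dg res points ds).2 = res ++
          (ds.filter (fun d => decide (2*d*d ≤ points))).flatMap
            (fun d => (pvTails n digits.length (points - 2*d*d)).map
              (fun c => c.reverse ++ d :: digits.drop (n+1))) := by
      intro ds
      induction ds with
      | nil =>
        intro dg res h1 h2
        simp only [pvGhdLoop]
        exact ⟨h1, h2, by simp⟩
      | cons d ds iht =>
        intro dg res hlen hdrop
        rw [pvGhdLoop]
        by_cases hc : 2*d*d ≤ points
        · simp only [if_pos hc]
          have hsetlen : (dg.set n d).length = digits.length := by simp [hlen]
          obtain ⟨h1, h2, h3⟩ := ih (dg.set n d) res (points - 2*d*d)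
            (by rw [hsetlen]; omega)
          have hdg : (dg.set n d).drop n = d :: digits.drop (n+1) := by
            rw [drop_set_cons dg n d (by rw [hlen]; omega), hdrop]
          obtain ⟨g1, g2, g3⟩ := iht (pvGhdRecur n (dg.set n d) res (points - 2*d*d)).1
            (pvGhdRecur n (dg.set n d) res (points - 2*d*d)).2
            (by rw [h1, hsetlen])
            (by
              have : (pvGhdRecur n (dg.set n d) res (points - 2*d*d)).1.drop (n+1) =
                  ((pvGhdRecur n (dg.set n d) res (points - 2*d*d)).1.drop n).drop 1 := by
                rw [List.drop_drop]
              rw [this, h2, hdg]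
              rfl)
          refine ⟨g1, g2, ?_⟩
          rw [g3, h3, hsetlen, hdg]
          simp [hc, List.append_assoc]
        · simp only [if_neg hc]
          obtain ⟨g1, g2, g3⟩ := iht dg res hlen hdrop
          refine ⟨g1, g2, ?_⟩
          rw [g3]
          simp [hc]
    rw [pvGhdRecur]
    obtain ⟨g1, g2, g3⟩ := hloop (PySem.List.pyRange (if ((n : Int) + 1) = (digits.length : Int) then 1 else 0) 10 1) digits results rfl rfl
    refine ⟨g1, g2, ?_⟩
    rw [g3]
    rw [show pvTails (n+1) digits.length points =
      ((PySem.List.pyRange (if ((n : Int) + 1) = ((digits.length : Nat) : Int) then 1 else 0) 10 1).filter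
          (fun d => decide (2 * d * d ≤ points))).flatMap
        (fun d => (pvTails n digits.length (points - 2 * d * d)).map (fun t => d :: t)) from rfl]
    rw [List.map_flatMap]
    simp [List.map_map, Function.comp_def, List.append_assoc]

lemma gen_half_digits_char (cnt : Int) :
    gen_half_digits cnt = (pvTails cnt.toNat cnt.toNat 9).map List.reverse := by
  unfold gen_half_digits
  obtain ⟨-, -, h3⟩ := pvGhd_char cnt.toNat (List.replicate cnt.toNat (0 : Int)) [] 9 (by simp)
  rw [h3]
  simp

lemma halves_link (cnt : Int) (h : 0 ≤ cnt) :
    gen_half_digits cnt = (pvHalves cnt).map List.reverse := by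
  rw [gen_half_digits_char]
  by_cases h0 : cnt = 0
  · subst h0; rfl
  · have hk : ∃ k : Nat, cnt.toNat = k + 1 := ⟨(cnt - 1).toNat, by omega⟩
    obtain ⟨k, hkk⟩ := hk
    have hk1 : (cnt - 1).toNat = k := by omega
    have h7 : pvTailsI k 7 = pvOnes k 3 := by
      have := tailsI_eq_ones k 3 (by omega)
      norm_num at this
      exact this
    rw [hkk, tails_top, h7, tailsI_one]
    unfold pvHalves
    rw [if_neg h0, hk1]
    simp

lemma halves_mem (cnt : Int) (h : 0 ≤ cnt) (c : List Int) (hc : c ∈ pvHalves cnt) :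
    c.length = cnt.toNat ∧ (∀ d ∈ c, 0 ≤ d) ∧ (c = [] ∨ ∃ d t, c = d :: t ∧ 1 ≤ d) := by
  unfold pvHalves at hc
  by_cases h0 : cnt = 0
  · rw [if_pos h0] at hc
    simp at hc
    subst hc
    simp [h0]
  · rw [if_neg h0] at hc
    have hk1 : (cnt - 1).toNat + 1 = cnt.toNat := by omega
    rcases List.mem_append.mp hc with h' | h'
    · obtain ⟨t, ht, rfl⟩ := List.mem_map.mp h'
      obtain ⟨hl, hd⟩ := ones_mem _ 3 t ht
      refine ⟨by simp [hl]; omega, ?_, Or.inr ⟨1, t, rfl, le_refl 1⟩⟩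
      intro d hd'
      rcases List.mem_cons.mp hd' with rfl | h'' <;>
        [omega; rcases hd d h'' with rfl | rfl <;> omega]
    · simp at h'
      subst h'
      refine ⟨by simp; omega, ?_, Or.inr ⟨2, _, rfl, by omega⟩⟩
      intro d hd'
      rcases List.mem_cons.mp hd' with rfl | h'' <;>
        [omega; (have := List.eq_of_mem_replicate h''; omega)]

lemma odd_body_eq (c : List Int) (acc : List Int) :
    (PySem.List.pyRange 0 10 1).foldl (fun acc2 m =>
        if m * m ≤ 9 - 2 * pvSumSq c then
          if (pvHorner c * 10 + m) * 10 ^ c.length + pvHorner c.reverse > 0 then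
            acc2 ++ [(pvHorner c * 10 + m) * 10 ^ c.length + pvHorner c.reverse]
          else acc2
        else acc2) acc
      = acc ++ gen_full_odd_palin_nums c.reverse := by
  have hval : ∀ mm : Int,
      ((c.reverse).foldl pvPalinStep
        ((((c.reverse).reverse).foldl pvPalinStep ((0:Int),(1:Int))).1 +
            mm * (((c.reverse).reverse).foldl pvPalinStep ((0:Int),(1:Int))).2,
         (((c.reverse).reverse).foldl pvPalinStep ((0:Int),(1:Int))).2 * 10)).1 =
      (pvHorner c * 10 + mm) * 10 ^ c.length + pvHorner c.reverse := by
    intro mm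
    rw [List.reverse_reverse, palinStep_foldl c, palinStep_foldl c.reverse]
    simp [List.reverse_reverse]
    ring
  have hcanon : ∀ (step : List Int → Int → List Int),
      (∀ (acc2 : List Int) (mm : Int), mm ∈ PySem.List.pyRange 0 10 1 →
        step acc2 mm = if (decide (mm*mm ≤ 9 - 2*pvSumSq c) &&
            decide ((pvHorner c * 10 + mm) * 10 ^ c.length + pvHorner c.reverse > 0)) then
            acc2 ++ [(pvHorner c * 10 + mm) * 10 ^ c.length + pvHorner c.reverse] else acc2) →
      ∀ l0 : List Int, (PySem.List.pyRange 0 10 1).foldl step l0 =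
        l0 ++ ((PySem.List.pyRange 0 10 1).filter (fun mm => decide (mm*mm ≤ 9 - 2*pvSumSq c) &&
            decide ((pvHorner c * 10 + mm) * 10 ^ c.length + pvHorner c.reverse > 0))).map
          (fun mm => (pvHorner c * 10 + mm) * 10 ^ c.length + pvHorner c.reverse) := by
    intro step hstep l0
    refine (PySem.List.foldl_congr_mem _ _ _ _ hstep).trans ?_
    exact PySem.List.foldl_append_if
      (fun mm => decide (mm*mm ≤ 9 - 2*pvSumSq c) &&
        decide ((pvHorner c * 10 + mm) * 10 ^ c.length + pvHorner c.reverse > 0))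
      (fun mm => (pvHorner c * 10 + mm) * 10 ^ c.length + pvHorner c.reverse)
      (PySem.List.pyRange 0 10 1) l0
  rw [show gen_full_odd_palin_nums c.reverse =
      (PySem.List.pyRange 0 10 1).foldl (fun results odd =>
        if odd * odd > 9 - 2 * pvSumSq c.reverse then results
        else if (List.foldl pvPalinStep ((List.foldl pvPalinStep ((0:Int),(1:Int)) c.reverse.reverse).1 + odd * (List.foldl pvPalinStep ((0:Int),(1:Int)) c.reverse.reverse).2, (List.foldl pvPalinStep ((0:Int),(1:Int)) c.reverse.reverse).2 * 10) c.reverse).1 > 0 then results ++ [(List.foldl pvPalinStep ((List.foldl pvPalinStep ((0:Int),(1:Int)) c.reverse.reverse).1 + odd * (List.foldl pvPalinStep ((0:Int),(1:Int)) c.reverse.reverse).2, (List.foldl pvPalinStep ((0:Int),(1:Int)) c.reverse.reverse).2 * 10) c.reverse).1] else results) [] from rfl]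
  rw [sumSq_reverse]
  have hB : ∀ (acc2 : List Int), ∀ mm ∈ PySem.List.pyRange 0 10 1,
      (if mm * mm ≤ 9 - 2 * pvSumSq c then
          if (pvHorner c * 10 + mm) * 10 ^ c.length + pvHorner c.reverse > 0 then
            acc2 ++ [(pvHorner c * 10 + mm) * 10 ^ c.length + pvHorner c.reverse]
          else acc2
        else acc2) =
      (if (decide (mm * mm ≤ 9 - 2 * pvSumSq c) &&
          decide ((pvHorner c * 10 + mm) * 10 ^ c.length + pvHorner c.reverse > 0)) then
          acc2 ++ [(pvHorner c * 10 + mm) * 10 ^ c.length + pvHorner c.reverse]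
        else acc2) := by
    intro acc2 mm _
    by_cases h1 : mm * mm ≤ 9 - 2 * pvSumSq c <;>
      by_cases h2 : (pvHorner c * 10 + mm) * 10 ^ c.length + pvHorner c.reverse > 0 <;>
      simp [h1, h2]
  have hA : ∀ (results : List Int), ∀ odd ∈ PySem.List.pyRange 0 10 1,
      (if odd * odd > 9 - 2 * pvSumSq c then results
        else if (List.foldl pvPalinStep ((List.foldl pvPalinStep ((0:Int),(1:Int)) c.reverse.reverse).1 + odd * (List.foldl pvPalinStep ((0:Int),(1:Int)) c.reverse.reverse).2, (List.foldl pvPalinStep ((0:Int),(1:Int)) c.reverse.reverse).2 * 10) c.reverse).1 > 0 then results ++ [(List.foldl pvPalinStep ((List.foldl pvPalinStep ((0:Int),(1:Int)) c.reverse.reverse).1 + odd * (List.foldl pvPalinStep ((0:Int),(1:Int)) c.reverse.reverse).2, (List.foldl pvPalinStep ((0:Int),(1:Int)) c.reverse.reverse).2 * 10) c.reverse).1] else results) =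
      (if (decide (odd * odd ≤ 9 - 2 * pvSumSq c) &&
          decide ((pvHorner c * 10 + odd) * 10 ^ c.length + pvHorner c.reverse > 0)) then results ++ [(pvHorner c * 10 + odd) * 10 ^ c.length + pvHorner c.reverse] else results) := by
    intro results odd _
    rw [hval odd]
    by_cases h1 : odd * odd > 9 - 2 * pvSumSq c <;>
      by_cases h2 : (pvHorner c * 10 + odd) * 10 ^ c.length + pvHorner c.reverse > 0 <;>
      simp [h1, h2]
  rw [hcanon _ hB acc, hcanon _ hA ([] : List Int)]
  simp

lemma horner_cons (d : Int) (t : List Int) :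
    pvHorner (d :: t) = d * 10 ^ t.length + pvHorner t := by
  show t.foldl (fun a d => a * 10 + d) (0 * 10 + d) = _
  rw [horner_acc t (0 * 10 + d)]
  ring

lemma halves_val (cnt : Int) (h : 0 ≤ cnt) (hd : List Int) (hhd : hd ∈ pvHalves cnt) :
    make_full_palin_num hd.reverse = pvHorner hd * 10 ^ cnt.toNat + pvHorner hd.reverse ∧
    (make_full_palin_num hd.reverse > 0 ↔ hd ≠ []) := by
  obtain ⟨hlen, hnn, hhead⟩ := halves_mem cnt h hd hhd
  have hmf : make_full_palin_num hd.reverse = pvHorner hd * 10 ^ cnt.toNat + pvHorner hd.reverse := by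
    rw [makeFull_eq, List.reverse_reverse, List.length_reverse, hlen]
    ring
  refine ⟨hmf, ?_⟩
  rw [hmf]
  rcases hhead with rfl | ⟨d, t, rfl, hd1⟩
  · simp [pvHorner]
  · have h1 : 1 ≤ pvHorner (d :: t) := by
      rw [horner_cons]
      have h2 : (0:Int) ≤ pvHorner t := horner_nonneg t (fun x hx => hnn x (by simp [hx]))
      have h3 : (1:Int) ≤ 10 ^ t.length := one_le_pow₀ (by norm_num)
      nlinarith
    have h2 : (0:Int) ≤ pvHorner (d :: t).reverse :=
      horner_nonneg _ (fun x hx => hnn x (List.mem_reverse.mp hx))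
    have h3 : (1:Int) ≤ 10 ^ cnt.toNat := one_le_pow₀ (by norm_num)
    constructor
    · intro _; simp
    · intro _; nlinarith

lemma even_eq (cnt : Int) (h : 0 ≤ cnt) :
    (((pvHalves cnt).map List.reverse).map make_full_palin_num).filter (fun p => decide (p > 0)) =
      ((pvHalves cnt).filter (fun hd => decide (hd ≠ []))).map
        (fun hd => pvHorner hd * 10 ^ cnt.toNat + pvHorner hd.reverse) := by
  rw [List.map_map, List.filter_map]
  have hfc : ∀ hd ∈ pvHalves cnt,
      ((fun p => decide (p > 0)) ∘ (make_full_palin_num ∘ List.reverse)) hd = decide (hd ≠ []) := by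
    intro hd hhd
    obtain ⟨-, hiff⟩ := halves_val cnt h hd hhd
    simp only [Function.comp]
    by_cases hne : hd = []
    · subst hne
      simp [makeFull_eq, pvHorner]
    · simp [hne, hiff.mpr hne]
  rw [List.filter_congr hfc]
  apply List.map_congr_left
  intro hd hhd
  obtain ⟨hmf, -⟩ := halves_val cnt h hd (List.mem_filter.mp hhd).1
  simpa using hmf

-- ===== VERDICT (by name: the statement is the Claim_ definition above) =====
theorem gen_palins_spec : Claim_equal_gen_palins := by
  intro mx _
  unfold Spec_gen_palins gen_palins gen_palins_alt
  apply PySem.List.foldl_congr_mem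
  intro acc cnt hmem
  have h0 : (0:Int) ≤ cnt := (PySem.List.mem_pyRange_one.mp hmem).1
  show (List.map gen_full_odd_palin_nums (gen_half_digits cnt)).foldl (fun r pt => r ++ pt)
        (acc ++ (List.map make_full_palin_num (gen_half_digits cnt)).filter (fun p => decide (p > 0))) =
      (pvHalves cnt).foldl
        (fun acc hd =>
          (PySem.List.pyRange 0 10 1).foldl
            (fun acc2 m =>
              if m * m ≤ 9 - 2 * pvSumSq hd then
                if (pvHorner hd * 10 + m) * 10 ^ cnt.toNat + pvHorner hd.reverse > 0 then
                  acc2 ++ [(pvHorner hd * 10 + m) * 10 ^ cnt.toNat + pvHorner hd.reverse]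
                else acc2
              else acc2)
            acc)
        ((pvHalves cnt).foldl
          (fun acc hd => if hd ≠ [] then acc ++ [pvHorner hd * 10 ^ cnt.toNat + pvHorner hd.reverse] else acc)
          acc)
  rw [halves_link cnt h0]
  -- A-side: the extend loop is an append of the flattened odd lists
  rw [PySem.List.foldl_append_eq_flatMap]
  rw [List.flatMap_map, List.flatMap_map]
  -- A-side even part
  rw [even_eq cnt h0]
  -- B-side even fold
  have hBe : (pvHalves cnt).foldl
      (fun acc hd => if hd ≠ [] then acc ++ [pvHorner hd * 10 ^ cnt.toNat + pvHorner hd.reverse] else acc) acc =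
      acc ++ ((pvHalves cnt).filter (fun hd => decide (hd ≠ []))).map
        (fun hd => pvHorner hd * 10 ^ cnt.toNat + pvHorner hd.reverse) := by
    refine (PySem.List.foldl_congr_mem _ _ _ _ ?_).trans
      (PySem.List.foldl_append_if (fun hd => decide (hd ≠ []))
        (fun hd => pvHorner hd * 10 ^ cnt.toNat + pvHorner hd.reverse) (pvHalves cnt) acc)
    intro acc2 hd _
    by_cases hne : hd = [] <;> simp [hne]
  rw [hBe]
  -- B-side odd folds: each inner fold appends that half's odd palindromes
  have hBo : ∀ (l0 : List Int), (pvHalves cnt).foldl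
      (fun acc hd =>
        (PySem.List.pyRange 0 10 1).foldl
          (fun acc2 m =>
            if m * m ≤ 9 - 2 * pvSumSq hd then
              if (pvHorner hd * 10 + m) * 10 ^ cnt.toNat + pvHorner hd.reverse > 0 then
                acc2 ++ [(pvHorner hd * 10 + m) * 10 ^ cnt.toNat + pvHorner hd.reverse]
              else acc2
            else acc2)
          acc) l0 =
      l0 ++ (pvHalves cnt).flatMap (fun hd => gen_full_odd_palin_nums hd.reverse) := by
    intro l0
    refine (PySem.List.foldl_congr_mem _ _
      (fun acc hd => acc ++ gen_full_odd_palin_nums hd.reverse) _ ?_).trans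
      (PySem.List.foldl_append_eq_flatMap _ _ _)
    intro acc2 hd hhd
    have hlen : hd.length = cnt.toNat := (halves_mem cnt h0 hd hhd).1
    rw [← hlen]
    exact odd_body_eq hd acc2
  rw [hBo]
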